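-- pv_equiv track=rewrite | github.com/enricserra/cancer_report | vcf_utils/vcf_tools.py | happens_first
-- ===== SOURCE A (Python) =====
-- def happens_first(text, a, b):
--     i = 0
--     while i < len(text):
--         if text[i] == a:
--             return a
--         if text[i] == b:
--             return b
--         i += 1
--     return a
-- ===== SOURCE B (Python) =====
-- def happens_first(text, a, b):
--     ia = None
--     for i, x in enumerate(text):
--         if x == a:
--             ia = i
--             break
--     ib = None
--     for i, x in enumerate(text):
--         if x == b:
--             ib = i
--             break
--     if ia is None:
--         return b if ib is not None else a
--     if ib is None:
--         return a
--     return a if ia <= ib else b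
-- ===== Notes on version B (the rewrite author's own statement) =====
-- stated objective: alternative
-- what changed: Instead of one interleaved scan testing both characters at each position, B computes the first-occurrence index of a and of b in two independent enumerate passes that break on the first match, then decides by comparing the indices (ties and not-found default to a).
import Mathlib
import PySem

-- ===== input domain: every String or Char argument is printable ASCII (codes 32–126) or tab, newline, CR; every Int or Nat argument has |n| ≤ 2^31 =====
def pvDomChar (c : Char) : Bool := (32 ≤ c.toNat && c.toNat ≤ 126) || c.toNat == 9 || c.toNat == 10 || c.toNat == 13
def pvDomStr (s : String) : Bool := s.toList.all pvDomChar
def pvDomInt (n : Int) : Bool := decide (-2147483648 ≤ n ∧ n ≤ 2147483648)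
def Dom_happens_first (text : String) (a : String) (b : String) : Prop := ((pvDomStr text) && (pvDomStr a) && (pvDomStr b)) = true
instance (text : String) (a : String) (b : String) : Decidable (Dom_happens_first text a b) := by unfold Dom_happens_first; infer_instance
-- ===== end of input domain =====

-- B replaces A's single interleaved scan by two independent first-index passes plus an index comparison (alternative decomposition, same O(n) cost).


-- ===== PORT A =====
-- A's while-loop over indices, transliterated as structural recursion over the characters;
-- text[i] is a one-character string, compared to the strings a and b.
def happensFirstLoop (a : String) (b : String) : List Char → String
  | [] => a
  | c :: rest =>
    if String.singleton c = a then a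
    else if String.singleton c = b then b
    else happensFirstLoop a b rest

def happens_first (text : String) (a : String) (b : String) : String :=
  happensFirstLoop a b text.toList

-- ===== PORT B =====
-- first pass of Source B: enumerate(text) with break on the first element equal to x
def firstIdx (x : String) (i : Nat) : List Char → Option Nat
  | [] => none
  | c :: rest => if String.singleton c = x then some i else firstIdx x (i + 1) rest

def happens_first_alt (text : String) (a : String) (b : String) : String :=
  let ia := firstIdx a 0 text.toList
  let ib := firstIdx b 0 text.toList
  match ia, ib with
  | none, none => a
  | none, some _ => b
  | some _, none => a
  | some i, some j => if i ≤ j then a else b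

-- ===== PRECONDITION & SPEC =====
def Spec_happens_first (text : String) (a : String) (b : String) (out : String) : Prop := out = happens_first_alt text a b
instance (text : String) (a : String) (b : String) (out : String) : Decidable (Spec_happens_first text a b out) := by unfold Spec_happens_first; infer_instance

-- ===== CLAIM (what is proved, stated in full; the proofs are below) =====
def Claim_equal_happens_first : Prop := ∀ (text : String) (a : String) (b : String), Dom_happens_first text a b → Spec_happens_first text a b (happens_first text a b)

-- ===== LEMMAS AND PROOFS =====
theorem firstIdx_ge (x : String) (cs : List Char) (k j : Nat)
    (h : firstIdx x k cs = some j) : k ≤ j := by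
  induction cs generalizing k with
  | nil => simp [firstIdx] at h
  | cons c rest ih =>
    simp only [firstIdx] at h
    split at h
    · injection h with h; omega
    · have := ih (k + 1) h; omega

theorem happensFirst_loop_eq (a b : String) (cs : List Char) (k : Nat) :
    happensFirstLoop a b cs =
      (match firstIdx a k cs, firstIdx b k cs with
       | none, none => a
       | none, some _ => b
       | some _, none => a
       | some i, some j => if i ≤ j then a else b) := by
  induction cs generalizing k with
  | nil => simp [happensFirstLoop, firstIdx]
  | cons c rest ih =>
    simp only [happensFirstLoop, firstIdx]
    by_cases ha : String.singleton c = a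
    · simp only [if_pos ha]
      by_cases hb : String.singleton c = b
      · simp only [if_pos hb]; simp
      · simp only [if_neg hb]
        cases hfb : firstIdx b (k + 1) rest with
        | none => simp
        | some j =>
          have := firstIdx_ge b rest (k + 1) j hfb
          simp [show k ≤ j by omega]
    · simp only [if_neg ha]
      by_cases hb : String.singleton c = b
      · simp only [if_pos hb]
        cases hfa : firstIdx a (k + 1) rest with
        | none => simp
        | some i =>
          have := firstIdx_ge a rest (k + 1) i hfa
          simp [show ¬ i ≤ k by omega]
      · simp only [if_neg hb]
        exact ih (k + 1)

-- ===== VERDICT (by name: the statement is the Claim_ definition above) =====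
theorem happens_first_spec : Claim_equal_happens_first := by
  intro text a b _
  unfold Spec_happens_first happens_first happens_first_alt
  exact happensFirst_loop_eq a b text.toList 0
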